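-- pv_equiv track=rewrite | github.com/suchot/CS-Notes | docs/offer/美团/保温箱.py | baowenxiang
-- ===== SOURCE A (Python) =====
-- def baowenxiang(n, a, b):
--     d = [(a[i], b[i]) for  i in range(n)]
--     all_a = sum(a)
--     d.sort(key= lambda x: [-x[1],x[0]])
--     minneed, need = 0,0
--     for i in range(n):
--         need += d[i][1]
--         if need >= all_a:
--             minneed = i+1
--             break
--     mintime = 0
--     for i in range(minneed, n):
--         mintime += d[i][0]
--
--     return minneed, mintime
-- ===== SOURCE B (Python) =====
-- def baowenxiang(n, a, b):
--     # Array strategy: sort once, then build the prefix sums of the capacities,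
--     # their running maximum (nondecreasing even with negative capacities) and the
--     # prefix sums of the remaining-times; locate the first prefix whose capacity
--     # covers sum(a) by BINARY SEARCH on the running-maximum array instead of a
--     # linear scan-with-break, and answer by subtracting the matching a-prefix.
--     boxes = sorted(((a[i], b[i]) for i in range(n)), key=lambda p: (-p[1], p[0]))
--     all_a = sum(a)
--     capmax = []   # capmax[i] = max over j<=i of (b-sum of the first j+1 boxes)
--     prea = []     # prea[i]   = a-sum of the first i+1 boxes
--     cs = 0
--     sum_n = 0
--     for x, v in boxes:
--         cs += v
--         capmax.append(cs if not capmax or cs > capmax[-1] else capmax[-1])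
--         sum_n += x
--         prea.append(sum_n)
--     if not capmax or capmax[-1] < all_a:
--         return 0, sum_n
--     lo, hi = 0, len(capmax) - 1
--     while lo < hi:
--         mid = (lo + hi) // 2
--         if capmax[mid] >= all_a:
--             hi = mid
--         else:
--             lo = mid + 1
--     return lo + 1, sum_n - prea[lo]
-- ===== Notes on version B (the rewrite author's own statement) =====
-- stated objective: alternative
-- what changed: Replaces A's linear scan-with-break plus a second suffix-summing loop by building prefix-sum arrays (capacities and times) together with a running-maximum array, and locating the first covering prefix by a hand-written binary search on that monotone array, answering by direct subtraction.
import Mathlib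
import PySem

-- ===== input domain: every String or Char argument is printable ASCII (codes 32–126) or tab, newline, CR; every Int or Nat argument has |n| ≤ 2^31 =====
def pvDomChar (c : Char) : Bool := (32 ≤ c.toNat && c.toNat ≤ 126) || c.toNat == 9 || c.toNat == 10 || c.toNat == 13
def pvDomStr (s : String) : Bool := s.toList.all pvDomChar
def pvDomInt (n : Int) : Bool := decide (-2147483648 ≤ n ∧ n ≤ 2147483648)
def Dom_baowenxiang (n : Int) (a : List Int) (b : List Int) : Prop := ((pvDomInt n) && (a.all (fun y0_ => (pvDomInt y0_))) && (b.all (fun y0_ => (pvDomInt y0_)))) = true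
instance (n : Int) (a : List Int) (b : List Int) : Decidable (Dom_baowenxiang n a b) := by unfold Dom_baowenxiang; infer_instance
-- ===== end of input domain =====

-- B replaces A's linear scan-with-break and second suffix loop by prefix-sum arrays,
-- a running-maximum array and a hand-written binary search over it (alternative algorithm).

-- ===== PORT A =====
-- the first for-loop with break: scans indices, accumulates need, returns i+1 on break, else 0
def baowenxiangFind (d : List (Int × Int)) (all_a : Int) : List Int → Int → Int
  | [], _ => 0
  | i :: rest, need =>
    let need' := need + (PySem.List.pyGetD d i (0, 0)).2
    if need' ≥ all_a then i + 1 else baowenxiangFind d all_a rest need'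

def baowenxiang (n : Int) (a : List Int) (b : List Int) : Int × Int :=
  let d := (PySem.List.pyRange 0 n 1).map
    (fun i => (PySem.List.pyGetD a i 0, PySem.List.pyGetD b i 0))
  let all_a := a.sum
  let ds := PySem.List.sorted d (fun x => toLex (-x.2, x.1)) false
  let minneed := baowenxiangFind ds all_a (PySem.List.pyRange 0 n 1) 0
  let mintime := (PySem.List.pyRange minneed n 1).foldl
    (fun acc i => acc + (PySem.List.pyGetD ds i (0, 0)).1) 0
  (minneed, mintime)

-- ===== PORT B =====
-- the body of B's building loop: extend the capacity prefix sum, its running maximum,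
-- and the remaining-time prefix sums ('cs if not capmax or cs > capmax[-1] else capmax[-1]')
def baowenxiangAltBuild (st : Int × List Int × Int × List Int) (p : Int × Int) :
    Int × List Int × Int × List Int :=
  let cs := st.1 + p.2
  let capmax := st.2.1
  let sum_n := st.2.2.1 + p.1
  let prea := st.2.2.2
  let entry := match capmax.getLast? with
    | none => cs
    | some m => if cs > m then cs else m
  (cs, capmax ++ [entry], sum_n, prea ++ [sum_n])

-- the while loop of B's binary search over the (nondecreasing) running-maximum array
def baowenxiangAltSearch (capmax : List Int) (all_a : Int) (lo hi : Int) : Int :=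
  if h : lo < hi then
    if PySem.List.pyGetD capmax (PySem.Int.floordiv (lo + hi) 2) 0 ≥ all_a then
      baowenxiangAltSearch capmax all_a lo (PySem.Int.floordiv (lo + hi) 2)
    else baowenxiangAltSearch capmax all_a (PySem.Int.floordiv (lo + hi) 2 + 1) hi
  else lo
termination_by (hi - lo).toNat
decreasing_by
  · have h2 : PySem.Int.floordiv (lo + hi) 2 < hi := by
      rw [PySem.Int.floordiv_lt_iff_lt_mul (by norm_num)]
      omega
    omega
  · have h1 := PySem.Int.floordiv_two_mid_bounds (le_of_lt h)
    omega

def baowenxiang_alt (n : Int) (a : List Int) (b : List Int) : Int × Int :=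
  let boxes := PySem.List.sorted
    ((PySem.List.pyRange 0 n 1).map
      (fun i => (PySem.List.pyGetD a i 0, PySem.List.pyGetD b i 0)))
    (fun x => toLex (-x.2, x.1)) false
  let all_a := a.sum
  let st := boxes.foldl baowenxiangAltBuild (0, [], 0, [])
  let capmax := st.2.1
  let sum_n := st.2.2.1
  let prea := st.2.2.2
  -- 'if not capmax or capmax[-1] < all_a' (capmax[-1] only read when capmax is nonempty)
  if capmax = [] ∨ (capmax.getLast?).getD 0 < all_a then (0, sum_n)
  else
    let lo := baowenxiangAltSearch capmax all_a 0 ((capmax.length : Int) - 1)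
    (lo + 1, sum_n - PySem.List.pyGetD prea lo 0)

-- ===== PRECONDITION & SPEC =====
-- Pre_ excludes exactly the inputs on which Python A raises IndexError: n beyond a's or b's length.
def Pre_baowenxiang (n : Int) (a : List Int) (b : List Int) : Prop :=
  n ≤ (a.length : Int) ∧ n ≤ (b.length : Int)
instance (n : Int) (a : List Int) (b : List Int) : Decidable (Pre_baowenxiang n a b) := by unfold Pre_baowenxiang; infer_instance
def pvWitness_baowenxiang : Int × List Int × List Int := (2, [3, 1], [2, 4])

def Spec_baowenxiang (n : Int) (a : List Int) (b : List Int) (out : Int × Int) : Prop := out = baowenxiang_alt n a b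
instance (n : Int) (a : List Int) (b : List Int) (out : Int × Int) : Decidable (Spec_baowenxiang n a b out) := by unfold Spec_baowenxiang; infer_instance

-- ===== CLAIM (what is proved, stated in full; the proofs are below) =====
def Claim_equal_baowenxiang : Prop := ∀ (n : Int) (a : List Int) (b : List Int), Dom_baowenxiang n a b → Pre_baowenxiang n a b → Spec_baowenxiang n a b (baowenxiang n a b)

-- ===== LEMMAS AND PROOFS =====

-- prefix sums of (f applied to) a list, starting from acc
def pvPre (f : Int × Int → Int) : List (Int × Int) → Int → List Int
  | [], _ => []
  | p :: t, acc => (acc + f p) :: pvPre f t (acc + f p)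

-- running maximum with an optional already-seen maximum
def pvCM : List Int → Option Int → List Int
  | [], _ => []
  | x :: t, none => x :: pvCM t (some x)
  | x :: t, some m => (if x > m then x else m) :: pvCM t (some (if x > m then x else m))

theorem pvPre_length (f : Int × Int → Int) :
    ∀ (l : List (Int × Int)) (acc : Int), (pvPre f l acc).length = l.length := by
  intro l
  induction l with
  | nil => intro acc; rfl
  | cons p t ih => intro acc; simp [pvPre, ih]

theorem pvCM_length : ∀ (P : List Int) (mo : Option Int), (pvCM P mo).length = P.length := by
  intro P
  induction P with
  | nil => intro mo; cases mo <;> rfl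
  | cons x t ih => intro mo; cases mo <;> simp [pvCM, ih]

-- B's building loop computes the three arrays
theorem pv_build_spec :
    ∀ (boxes : List (Int × Int)) (cs : Int) (cm : List Int) (s : Int) (pa : List Int),
      boxes.foldl baowenxiangAltBuild (cs, cm, s, pa)
        = (cs + (boxes.map Prod.snd).sum,
           cm ++ pvCM (pvPre Prod.snd boxes cs) cm.getLast?,
           s + (boxes.map Prod.fst).sum,
           pa ++ pvPre Prod.fst boxes s) := by
  intro boxes
  induction boxes with
  | nil => intro cs cm s pa; simp [pvPre, pvCM]
  | cons p t ih =>
    intro cs cm s pa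
    rw [List.foldl_cons]
    show t.foldl baowenxiangAltBuild (baowenxiangAltBuild (cs, cm, s, pa) p) = _
    simp only [baowenxiangAltBuild]
    rw [ih]
    cases hlast : cm.getLast? with
    | none =>
      have hcm : cm = [] := List.getLast?_eq_none_iff.mp hlast
      subst hcm
      simp only [pvPre, pvCM, List.nil_append, List.map_cons, List.sum_cons,
        List.cons_append, List.append_assoc, Prod.mk.injEq]
      refine ⟨by ring, ?_, by ring, ?_⟩ <;> simp
    | some m =>
      simp only [List.getLast?_concat, pvPre, pvCM, List.map_cons, List.sum_cons,
        List.append_assoc, List.cons_append, List.nil_append, Prod.mk.injEq]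
      refine ⟨by ring, ?_, by ring, ?_⟩ <;> simp

-- getter for pvPre: entry i is the (i+1)-prefix sum
theorem pvPre_getD (f : Int × Int → Int) :
    ∀ (l : List (Int × Int)) (acc : Int) (i : Nat), i < l.length →
      (pvPre f l acc).getD i 0 = acc + ((l.map f).take (i + 1)).sum := by
  intro l
  induction l with
  | nil => intro acc i h; simp at h
  | cons p t ih =>
    intro acc i h
    cases i with
    | zero => simp [pvPre]
    | succ i =>
      simp only [pvPre, List.getD_cons_succ, List.map_cons]
      rw [ih (acc + f p) i (by simpa using h)]
      rw [List.take_succ_cons, List.sum_cons]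
      ring

-- the running maximum reaches T at i iff some prefix sum up to i reaches T
theorem pvCM_getD_ge (T : Int) :
    ∀ (P : List Int) (mo : Option Int) (i : Nat), i < P.length →
      (T ≤ (pvCM P mo).getD i 0
        ↔ (∃ j : Nat, j ≤ i ∧ T ≤ P.getD j 0) ∨ (∃ m, mo = some m ∧ T ≤ m)) := by
  intro P
  induction P with
  | nil => intro mo i h; simp at h
  | cons x t ih =>
    intro mo i h
    cases mo with
    | none =>
      cases i with
      | zero =>
        simp only [pvCM, List.getD_cons_zero]
        constructor
        · intro hx; exact Or.inl ⟨0, le_refl _, by simpa using hx⟩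
        · rintro (⟨j, hj, hT⟩ | ⟨m, hm, _⟩)
          · interval_cases j; simpa using hT
          · cases hm
      | succ i =>
        simp only [pvCM, List.getD_cons_succ]
        rw [ih (some x) i (by simpa using h)]
        constructor
        · rintro (⟨j, hj, hT⟩ | ⟨m, hm, hT⟩)
          · exact Or.inl ⟨j + 1, by omega, by simpa using hT⟩
          · cases hm; exact Or.inl ⟨0, by omega, by simpa using hT⟩
        · rintro (⟨j, hj, hT⟩ | ⟨m, hm, _⟩)
          · cases j with
            | zero => exact Or.inr ⟨x, rfl, by simpa using hT⟩
            | succ j => exact Or.inl ⟨j, by omega, by simpa using hT⟩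
          · cases hm
    | some m =>
      cases i with
      | zero =>
        simp only [pvCM, List.getD_cons_zero]
        constructor
        · intro hx
          by_cases hc : x > m
          · rw [if_pos hc] at hx; exact Or.inl ⟨0, le_refl _, by simpa using hx⟩
          · rw [if_neg hc] at hx; exact Or.inr ⟨m, rfl, hx⟩
        · rintro (⟨j, hj, hT⟩ | ⟨m', hm', hT⟩)
          · interval_cases j
            simp only [List.getD_cons_zero] at hT
            split_ifs <;> omega
          · cases hm'; split_ifs <;> omega
      | succ i =>
        simp only [pvCM, List.getD_cons_succ]
        rw [ih (some (if x > m then x else m)) i (by simpa using h)]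
        constructor
        · rintro (⟨j, hj, hT⟩ | ⟨m', hm', hT⟩)
          · exact Or.inl ⟨j + 1, by omega, by simpa using hT⟩
          · cases hm'
            by_cases hc : x > m
            · rw [if_pos hc] at hT; exact Or.inl ⟨0, by omega, by simpa using hT⟩
            · rw [if_neg hc] at hT; exact Or.inr ⟨m, rfl, hT⟩
        · rintro (⟨j, hj, hT⟩ | ⟨m', hm', hT⟩)
          · cases j with
            | zero =>
              refine Or.inr ⟨_, rfl, ?_⟩
              simp only [List.getD_cons_zero] at hT
              split_ifs <;> omega
            | succ j => exact Or.inl ⟨j, by omega, by simpa using hT⟩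
          · cases hm'
            refine Or.inr ⟨_, rfl, ?_⟩
            split_ifs <;> omega

-- pyGetD with a nonnegative in-range Int index is getD at toNat
theorem pv_pyGetD_int (xs : List Int) (r : Int) (d : Int) (h0 : 0 ≤ r) :
    PySem.List.pyGetD xs r d = xs.getD r.toNat d := by
  have h : r = ((r.toNat : Nat) : Int) := by omega
  conv_lhs => rw [h]
  rw [PySem.List.pyGetD_natCast]

-- binary search on an array whose '≥ T' region is upward closed returns its first element
theorem pv_search_spec (cm : List Int) (T : Int)
    (hmono : ∀ (p q : Nat), p ≤ q → q < cm.length → T ≤ cm.getD p 0 → T ≤ cm.getD q 0) :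
    ∀ (N : Nat) (lo hi : Int), (hi - lo).toNat ≤ N → 0 ≤ lo → lo ≤ hi →
      hi < (cm.length : Int) → T ≤ cm.getD hi.toNat 0 →
      (∀ j : Nat, (j : Int) < lo → cm.getD j 0 < T) →
      ∃ rn : Nat, baowenxiangAltSearch cm T lo hi = (rn : Int) ∧ rn < cm.length ∧
        T ≤ cm.getD rn 0 ∧ ∀ j : Nat, j < rn → cm.getD j 0 < T := by
  intro N
  induction N with
  | zero =>
    intro lo hi hN h0 hle hlen hT hbelow
    have heq : lo = hi := by omega
    subst heq
    rw [baowenxiangAltSearch]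
    rw [dif_neg (by omega)]
    exact ⟨lo.toNat, by omega, by omega, hT, fun j hj => hbelow j (by omega)⟩
  | succ N ih =>
    intro lo hi hN h0 hle hlen hT hbelow
    by_cases hlt : lo < hi
    · rw [baowenxiangAltSearch, dif_pos hlt]
      have hmid := PySem.Int.floordiv_two_mid_bounds (le_of_lt hlt)
      have hmidlt : PySem.Int.floordiv (lo + hi) 2 < hi := by
        rw [PySem.Int.floordiv_lt_iff_lt_mul (by norm_num)]
        omega
      set mid := PySem.Int.floordiv (lo + hi) 2 with hmiddef
      have hmid0 : 0 ≤ mid := by omega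
      have hmidlen : mid.toNat < cm.length := by omega
      rw [pv_pyGetD_int cm mid 0 hmid0]
      by_cases hc : T ≤ cm.getD mid.toNat 0
      · rw [if_pos hc]
        exact ih lo mid (by omega) h0 (by omega) (by omega) hc hbelow
      · rw [if_neg hc]
        refine ih (mid + 1) hi (by omega) (by omega) (by omega) hlen hT ?_
        intro j hj
        by_contra hge
        exact hc (hmono j mid.toNat (by omega) hmidlen (by omega))
    · rw [baowenxiangAltSearch, dif_neg hlt]
      have heq : lo = hi := by omega
      subst heq
      exact ⟨lo.toNat, by omega, by omega, hT, fun j hj => hbelow j (by omega)⟩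

-- prefix b-sum step
theorem pv_Ps_succ (S : List (Int × Int)) (k : Nat) (h : k < S.length) :
    ((S.map Prod.snd).take (k + 1)).sum = ((S.map Prod.snd).take k).sum + (S[k]).2 := by
  have hg : (S.map Prod.snd)[k]? = some (S[k]).2 := by
    simp [List.getElem?_map, List.getElem?_eq_getElem h]
  rw [List.take_add_one, hg]
  simp

-- A's scanning loop returns 0 when no prefix reaches all_a
theorem pv_find_none (S : List (Int × Int)) (T : Int)
    (hno : ∀ i : Nat, i < S.length → T ≤ ((S.map Prod.snd).take (i + 1)).sum → False) :
    ∀ (j k : Nat), j = S.length - k → k ≤ S.length →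
      baowenxiangFind S T (PySem.List.pyRange (k : Int) (S.length : Int) 1)
        (((S.map Prod.snd).take k).sum) = 0 := by
  intro j
  induction j with
  | zero =>
    intro k hj hk
    rw [PySem.List.pyRange_one_eq_nil (by omega)]
    rfl
  | succ j ih =>
    intro k hj hk
    have hlt : k < S.length := by omega
    rw [PySem.List.pyRange_one_cons (by exact_mod_cast hlt)]
    simp only [baowenxiangFind]
    rw [PySem.List.pyGetD_ofNat (xs := S) (n := k) (d := (0, 0)) hlt]
    have hb : ¬ (((S.map Prod.snd).take k).sum + (S[k]).2 ≥ T) := by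
      have := hno k hlt
      rw [pv_Ps_succ S k hlt] at this
      intro hcon
      exact this (by omega)
    simp only [if_neg hb]
    have hcast : ((k : Int) + 1) = ((k + 1 : Nat) : Int) := by push_cast; ring
    rw [← pv_Ps_succ S k hlt, hcast]
    exact ih (k + 1) (by omega) (by omega)

-- A's scanning loop returns r+1 when r is the first crossing
theorem pv_find_cross (S : List (Int × Int)) (T : Int) (r : Nat)
    (hr : r < S.length) (hT : T ≤ ((S.map Prod.snd).take (r + 1)).sum)
    (hmin : ∀ j : Nat, j < r → ((S.map Prod.snd).take (j + 1)).sum < T) :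
    ∀ (j k : Nat), j = r - k → k ≤ r →
      baowenxiangFind S T (PySem.List.pyRange (k : Int) (S.length : Int) 1)
        (((S.map Prod.snd).take k).sum) = (r : Int) + 1 := by
  intro j
  induction j with
  | zero =>
    intro k hj hk
    have hkr : k = r := by omega
    subst hkr
    rw [PySem.List.pyRange_one_cons (by exact_mod_cast hr)]
    simp only [baowenxiangFind]
    rw [PySem.List.pyGetD_ofNat (xs := S) (n := k) (d := (0, 0)) hr]
    have hb : ((S.map Prod.snd).take k).sum + (S[k]).2 ≥ T := by
      rw [pv_Ps_succ S k hr] at hT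
      omega
    simp only [if_pos hb]
  | succ j ih =>
    intro k hj hk
    have hlt : k < S.length := by omega
    rw [PySem.List.pyRange_one_cons (by exact_mod_cast hlt)]
    simp only [baowenxiangFind]
    rw [PySem.List.pyGetD_ofNat (xs := S) (n := k) (d := (0, 0)) hlt]
    have hb : ¬ (((S.map Prod.snd).take k).sum + (S[k]).2 ≥ T) := by
      have := hmin k (by omega)
      rw [pv_Ps_succ S k hlt] at this
      omega
    simp only [if_neg hb]
    have hcast : ((k : Int) + 1) = ((k + 1 : Nat) : Int) := by push_cast; ring
    rw [← pv_Ps_succ S k hlt, hcast]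
    exact ih (k + 1) (by omega) (by omega)

-- suffix sum as total minus prefix
theorem pv_sum_drop (t : List Int) (k : Nat) :
    (t.drop k).sum = t.sum - (t.take k).sum := by
  have h : (t.take k ++ t.drop k).sum = t.sum := by rw [List.take_append_drop]
  rw [List.sum_append] at h
  omega

theorem pv_foldl_sum : ∀ (t : List (Int × Int)) (init : Int),
    t.foldl (fun acc p => acc + p.1) init = init + (t.map Prod.fst).sum := by
  intro t
  induction t with
  | nil => intro init; simp
  | cons x xs ih =>
    intro init
    simp only [List.foldl_cons, List.map_cons, List.sum_cons]
    rw [ih]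
    ring

-- A's second loop is the suffix a-sum
theorem pv_loop2 (S : List (Int × Int)) (r m : Int) (hr : 0 ≤ r)
    (hm : m = (S.length : Int)) :
    (PySem.List.pyRange r m 1).foldl
      (fun acc i => acc + (PySem.List.pyGetD S i (0, 0)).1) 0
    = ((S.map Prod.fst).drop r.toNat).sum := by
  subst hm
  rw [PySem.List.foldl_pyRange_pyGetD' S (0, 0) (fun acc p => acc + p.1) 0 hr, pv_foldl_sum,
    List.map_drop]
  ring

-- ===== VERDICT (by name: the statement is the Claim_ definition above) =====
theorem baowenxiang_spec : Claim_equal_baowenxiang := by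
  intro n a b _ _
  show baowenxiang n a b = baowenxiang_alt n a b
  simp only [baowenxiang, baowenxiang_alt]
  set d := (PySem.List.pyRange 0 n 1).map
    (fun i => (PySem.List.pyGetD a i 0, PySem.List.pyGetD b i 0)) with hd
  set S := PySem.List.sorted d (fun x => toLex (-x.2, x.1)) false with hS
  rw [pv_build_spec]
  simp only [List.getLast?_nil, List.nil_append]
  set T := a.sum with hT
  set P := pvPre Prod.snd S 0 with hP
  set PA := pvPre Prod.fst S 0 with hPA
  set cm := pvCM P none with hcm
  set M := (S.map Prod.fst).sum with hM
  have hPlen : P.length = S.length := by rw [hP, pvPre_length]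
  have hcmlen : cm.length = S.length := by rw [hcm, pvCM_length, hPlen]
  have hPAlen : PA.length = S.length := by rw [hPA, pvPre_length]
  -- entries of P are the b-prefix sums, entries of PA the a-prefix sums
  have hPget : ∀ i : Nat, i < S.length →
      P.getD i 0 = ((S.map Prod.snd).take (i + 1)).sum := by
    intro i hi
    rw [hP, pvPre_getD Prod.snd S 0 i hi]
    ring
  have hPAget : ∀ i : Nat, i < S.length →
      PA.getD i 0 = ((S.map Prod.fst).take (i + 1)).sum := by
    intro i hi
    rw [hPA, pvPre_getD Prod.fst S 0 i hi]
    ring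
  have hF2 : ∀ i : Nat, i < S.length →
      (T ≤ cm.getD i 0 ↔ ∃ j : Nat, j ≤ i ∧ T ≤ ((S.map Prod.snd).take (j + 1)).sum) := by
    intro i hi
    rw [hcm, pvCM_getD_ge T P none i (by omega)]
    constructor
    · rintro (⟨j, hj, hTj⟩ | ⟨m, hm, _⟩)
      · exact ⟨j, hj, by rwa [hPget j (by omega)] at hTj⟩
      · cases hm
    · rintro ⟨j, hj, hTj⟩
      exact Or.inl ⟨j, hj, by rwa [hPget j (by omega)]⟩
  by_cases hn : 0 ≤ n
  · have hSl : (S.length : Int) = n := by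
      rw [hS, PySem.List.length_sorted, hd, List.length_map, PySem.List.length_pyRange_one]
      omega
    by_cases hempty : cm = []
    · -- empty arrays: no boxes at all
      have hS0 : S = [] := by
        have : cm.length = 0 := by rw [hempty]; rfl
        exact List.eq_nil_of_length_eq_zero (by omega)
      have hn0 : n = 0 := by rw [← hSl, hS0]; rfl
      subst hn0
      rw [if_pos (Or.inl hempty)]
      rw [hS0]
      simp [baowenxiangFind, PySem.List.pyRange_one_eq_nil (le_refl (0 : Int)), hM, hS0]
    · have hSne : 0 < S.length := by
        by_contra hc
        exact hempty (List.eq_nil_of_length_eq_zero (by omega))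
      obtain ⟨last, hlast⟩ : ∃ l, cm.getLast? = some l := by
        cases hx : cm.getLast? with
        | none => exact absurd (List.getLast?_eq_none_iff.mp hx) hempty
        | some l => exact ⟨l, rfl⟩
      have hlastD : last = cm.getD (S.length - 1) 0 := by
        have := List.getLast?_eq_getElem? (l := cm)
        rw [hlast, hcmlen] at this
        rw [List.getD_eq_getElem?_getD, ← this]
        rfl
      by_cases hcross : T ≤ last
      · rw [if_neg (by
          rintro (hc | hc)
          · exact hempty hc
          · rw [hlast] at hc
            simp only [Option.getD_some] at hc
            omega)]
        -- a crossing exists: binary search finds the first one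
        have hmono : ∀ (p q : Nat), p ≤ q → q < cm.length → T ≤ cm.getD p 0 → T ≤ cm.getD q 0 := by
          intro p q hpq hq hTp
          rw [hF2 q (by omega)]
          rcases (hF2 p (by omega)).mp hTp with ⟨j, hj, hTj⟩
          exact ⟨j, by omega, hTj⟩
        have hsearch := pv_search_spec cm T hmono ((((cm.length : Int) - 1) - 0).toNat)
          0 ((cm.length : Int) - 1) (le_refl _) (le_refl _) (by omega) (by omega)
          (by
            have : ((cm.length : Int) - 1).toNat = S.length - 1 := by omega
            rw [this, ← hlastD]
            exact hcross)
          (by intro j hj; omega)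
        rcases hsearch with ⟨rn, hrn, hrnlen, hrnT, hrnmin⟩
        rw [hcmlen] at hrnlen
        -- translate the cm-crossing into the first P-crossing
        have hcrossP : T ≤ ((S.map Prod.snd).take (rn + 1)).sum ∧
            ∀ j : Nat, j < rn → ((S.map Prod.snd).take (j + 1)).sum < T := by
          rcases (hF2 rn hrnlen).mp hrnT with ⟨j, hj, hTj⟩
          by_cases hrn0 : rn = 0
          · subst hrn0
            have : j = 0 := by omega
            subst this
            exact ⟨hTj, by omega⟩
          · have hprev : cm.getD (rn - 1) 0 < T := hrnmin (rn - 1) (by omega)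
            have hnone : ∀ i : Nat, i ≤ rn - 1 → ((S.map Prod.snd).take (i + 1)).sum < T := by
              intro i hi
              by_contra hc
              have := (hF2 (rn - 1) (by omega)).mpr ⟨i, hi, by omega⟩
              omega
            have hjrn : j = rn := by
              by_contra hc
              have := hnone j (by omega)
              omega
            subst hjrn
            exact ⟨hTj, fun j' hj' => hnone j' (by omega)⟩
        have hfind := pv_find_cross S T rn hrnlen hcrossP.1 hcrossP.2 rn 0 (by omega) (by omega)
        simp only [List.take_zero, List.sum_nil, Nat.cast_zero] at hfind
        rw [hSl] at hfind
        rw [hfind, hrn]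
        -- second components
        have hloop2 := pv_loop2 S ((rn : Int) + 1) n (by omega) hSl.symm
        rw [hloop2]
        have htoNat : ((rn : Int) + 1).toNat = rn + 1 := by omega
        rw [htoNat, pv_sum_drop (S.map Prod.fst) (rn + 1)]
        rw [pv_pyGetD_int PA (rn : Int) 0 (by omega)]
        have : ((rn : Int)).toNat = rn := by omega
        rw [this, hPAget rn hrnlen]
        simp [hM]
      · -- no prefix ever reaches T: both return (0, total)
        rw [if_pos (Or.inr (by rw [hlast]; simpa using by omega))]
        have hno : ∀ i : Nat, i < S.length → T ≤ ((S.map Prod.snd).take (i + 1)).sum → False := by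
          intro i hi hTi
          exact hcross (by
            rw [hlastD]
            exact (hF2 (S.length - 1) (by omega)).mpr ⟨i, by omega, hTi⟩)
        have hfind := pv_find_none S T hno S.length 0 (by omega) (by omega)
        simp only [List.take_zero, List.sum_nil, Nat.cast_zero] at hfind
        rw [hSl] at hfind
        rw [hfind]
        have hloop2 := pv_loop2 S 0 n (le_refl _) hSl.symm
        rw [hloop2]
        simp [hM]
  · -- n < 0: no boxes
    have hS0 : S = [] := by
      have : S.length = 0 := by
        rw [hS, PySem.List.length_sorted, hd, List.length_map, PySem.List.length_pyRange_one]
        omega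
      exact List.eq_nil_of_length_eq_zero this
    have hcm0 : cm = [] := by rw [hcm, hP, hS0]; rfl
    rw [hS0]
    simp only [baowenxiangFind, hM, hS0, hcm0, List.map_nil, List.sum_nil,
      PySem.List.pyRange_one_eq_nil (show n ≤ 0 by omega)]
    simp
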